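-- pv_equiv track=rewrite | github.com/jyk13579/OLMo | analysis/ppl_analysis.py | get_perturb_indices
-- ===== SOURCE A (Python) =====
-- def get_perturb_indices(l, max_len=500, margin=25):
--     if len(l)==0:
--         return []
--     else:
--         result = []
--         for i in range(len(l)-1):
--             if l[i]+margin<l[i+1]:
--                 result.extend(list(range(l[i]+margin,l[i+1])))
--         if l[-1]<max_len-margin:
--             result.extend(list(range(l[-1]+margin,max_len)))
--
--         return result
-- ===== SOURCE B (Python) =====
-- def get_perturb_indices(l, max_len=500, margin=25):
--     out = []
--     prev = max_len
--     for a in reversed(list(l)):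
--         out.extend(range(prev - 1, a + margin - 1, -1))
--         prev = a
--     out.reverse()
--     return out
-- ===== Notes on version B (the rewrite author's own statement) =====
-- stated objective: alternative
-- what changed: B traverses the list backwards with a running 'prev' accumulator (initialised to max_len) and builds the output back-to-front by prepending each gap range, eliminating A's index arithmetic, its separate trailing-region branch and its empty-list guard.
import Mathlib
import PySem

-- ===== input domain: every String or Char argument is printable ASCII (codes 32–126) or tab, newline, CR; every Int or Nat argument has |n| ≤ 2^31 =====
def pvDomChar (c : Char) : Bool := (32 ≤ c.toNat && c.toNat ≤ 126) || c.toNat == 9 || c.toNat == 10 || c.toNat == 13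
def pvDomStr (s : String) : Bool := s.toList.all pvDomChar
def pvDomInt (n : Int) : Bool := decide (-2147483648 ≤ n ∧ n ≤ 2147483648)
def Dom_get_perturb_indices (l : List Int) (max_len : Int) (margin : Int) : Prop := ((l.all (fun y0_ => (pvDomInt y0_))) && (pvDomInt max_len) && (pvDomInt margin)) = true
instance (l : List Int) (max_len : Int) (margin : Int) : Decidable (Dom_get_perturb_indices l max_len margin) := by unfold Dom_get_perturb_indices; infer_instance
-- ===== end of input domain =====

-- B traverses the list backwards with a running prev accumulator, emitting each gap
-- range in descending order and reversing once at the end (objective: alternative decomposition).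

-- ===== PORT A =====
-- indices i and i+1 are always in range, so pyGetD with default 0 is exact here
def get_perturb_indices (l : List Int) (max_len : Int) (margin : Int) : List Int :=
  if l.length = 0 then []
  else
    let result : List Int :=
      (PySem.List.pyRange 0 ((l.length : Int) - 1) 1).foldl
        (fun result i =>
          if PySem.List.pyGetD l i 0 + margin < PySem.List.pyGetD l (i + 1) 0 then
            result ++ PySem.List.pyRange (PySem.List.pyGetD l i 0 + margin) (PySem.List.pyGetD l (i + 1) 0) 1
          else result) []
    if PySem.List.pyGetD l (-1) 0 < max_len - margin then
      result ++ PySem.List.pyRange (PySem.List.pyGetD l (-1) 0 + margin) max_len 1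
    else result

-- ===== PORT B =====
-- state (out, prev): for each a of reversed(l), append range(prev-1, a+margin-1, -1), set prev := a; reverse at the end
def get_perturb_indices_alt (l : List Int) (max_len : Int) (margin : Int) : List Int :=
  (l.reverse.foldl
    (fun st a => (st.1 ++ PySem.List.pyRange (st.2 - 1) (a + margin - 1) (-1), a))
    (([] : List Int), max_len)).1.reverse

-- ===== PRECONDITION & SPEC =====
def Spec_get_perturb_indices (l : List Int) (max_len : Int) (margin : Int) (out : List Int) : Prop := out = get_perturb_indices_alt l max_len margin
instance (l : List Int) (max_len : Int) (margin : Int) (out : List Int) : Decidable (Spec_get_perturb_indices l max_len margin out) := by unfold Spec_get_perturb_indices; infer_instance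

-- ===== CLAIM (what is proved, stated in full; the proofs are below) =====
def Claim_equal_get_perturb_indices : Prop := ∀ (l : List Int) (max_len : Int) (margin : Int), Dom_get_perturb_indices l max_len margin → Spec_get_perturb_indices l max_len margin (get_perturb_indices l max_len margin)

-- ===== LEMMAS AND PROOFS =====

-- A's guard is redundant: when it is false the range is empty anyway
theorem gap_if_eq (a b m : Int) :
    (if a + m < b then PySem.List.pyRange (a + m) b 1 else []) = PySem.List.pyRange (a + m) b 1 := by
  split_ifs with h
  · rfl
  · exact (PySem.List.pyRange_one_eq_nil (by omega)).symm

-- a descending gap range is the reverse of the ascending one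
theorem range_down_eq (p a m : Int) :
    PySem.List.pyRange (p - 1) (a + m - 1) (-1) = (PySem.List.pyRange (a + m) p 1).reverse := by
  rw [PySem.List.pyRange_neg_one_eq_reverse]
  congr 1; ring_nf

-- B's backward fold characterised: its value is the reversed pair-gap flatMap, its prev is l.headD M
theorem foldr_char (M m : Int) : ∀ (l : List Int),
    l.foldr (fun a st => (st.1 ++ PySem.List.pyRange (st.2 - 1) (a + m - 1) (-1), a)) (([] : List Int), M)
      = ((((l ++ [M]).zip (l ++ [M]).tail).flatMap (fun p => PySem.List.pyRange (p.1 + m) p.2 1)).reverse,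
         l.headD M) := by
  intro l
  induction l with
  | nil => simp [List.zip]
  | cons x xs ih =>
    rw [List.foldr_cons, ih, range_down_eq]
    cases xs with
    | nil => simp [List.zip]
    | cons y r => simp [List.zip_cons_cons]

-- B as a flatMap over the consecutive pairs of the sentinel-augmented list
theorem alt_eq_flatMap (l : List Int) (M m : Int) :
    get_perturb_indices_alt l M m =
      ((l ++ [M]).zip (l ++ [M]).tail).flatMap (fun p => PySem.List.pyRange (p.1 + m) p.2 1) := by
  unfold get_perturb_indices_alt
  rw [List.foldl_reverse, foldr_char, List.reverse_reverse]

-- core: A's index-loop value plus the tail range equals the pair flatMap, for nonempty l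
theorem core (m M : Int) : ∀ (l : List Int) (h : l ≠ []),
    (PySem.List.pyRange 0 ((l.length : Int) - 1) 1).flatMap
        (fun i => PySem.List.pyRange (PySem.List.pyGetD l i 0 + m) (PySem.List.pyGetD l (i + 1) 0) 1)
      ++ PySem.List.pyRange (l.getLast h + m) M 1
    = ((l ++ [M]).zip (l ++ [M]).tail).flatMap (fun p => PySem.List.pyRange (p.1 + m) p.2 1) := by
  intro l
  induction l with
  | nil => intro h; exact absurd rfl h
  | cons x xs ih =>
    intro _
    cases xs with
    | nil =>
      simp [PySem.List.pyRange_one_eq_nil, List.zip]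
    | cons y r =>
      have hlt : (0:Int) < ((x :: y :: r).length : Int) - 1 := by
        push_cast [List.length_cons]; omega
      rw [PySem.List.pyRange_one_cons hlt]
      simp only [List.cons_append, List.tail_cons, List.zip_cons_cons, List.flatMap_cons]
      have hshift : PySem.List.pyRange (0 + 1) (((x :: y :: r).length : Int) - 1) 1
          = (PySem.List.pyRange 0 (((y :: r).length : Int) - 1) 1).map (· + 1) := by
        rw [PySem.List.pyRange_one, PySem.List.pyRange_one]
        have he : ((((x :: y :: r).length : Int) - 1) - (0 + 1)).toNat
            = ((((y :: r).length : Int) - 1) - 0).toNat := by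
          push_cast [List.length_cons]; omega
        rw [he, List.map_map]
        refine List.map_congr_left ?_
        intro k _
        simp; omega
      rw [hshift, List.flatMap_map]
      have hbody : ∀ k : Int, 0 ≤ k →
          PySem.List.pyGetD (x :: y :: r) (k + 1) 0 = PySem.List.pyGetD (y :: r) k 0 := by
        intro k hk
        obtain ⟨n, rfl⟩ := Int.eq_ofNat_of_zero_le hk
        have hc : ((n : Int) + 1) = ((n + 1 : Nat) : Int) := by push_cast; ring
        rw [hc, PySem.List.pyGetD_natCast, PySem.List.pyGetD_natCast]
        rfl
      have hfm : (PySem.List.pyRange 0 (((y :: r).length : Int) - 1) 1).flatMap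
            (fun a => PySem.List.pyRange (PySem.List.pyGetD (x :: y :: r) (a + 1) 0 + m)
                (PySem.List.pyGetD (x :: y :: r) (a + 1 + 1) 0) 1)
          = (PySem.List.pyRange 0 (((y :: r).length : Int) - 1) 1).flatMap
            (fun i => PySem.List.pyRange (PySem.List.pyGetD (y :: r) i 0 + m)
                (PySem.List.pyGetD (y :: r) (i + 1) 0) 1) := by
        refine List.flatMap_congr ?_
        intro k hk
        have hk0 : 0 ≤ k := (PySem.List.mem_pyRange_one.mp hk).1
        rw [hbody k hk0, hbody (k + 1) (by omega)]
      rw [hfm]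
      have h0 : PySem.List.pyGetD (x :: y :: r) 0 0 = x := PySem.List.pyGetD_zero_cons x (y :: r) 0
      have h1 : PySem.List.pyGetD (x :: y :: r) (0 + 1) 0 = y := by
        rw [hbody 0 le_rfl]; exact PySem.List.pyGetD_zero_cons y r 0
      rw [h0, h1]
      have hlast : (x :: y :: r).getLast (by simp) = (y :: r).getLast (by simp) := by
        simp [List.getLast]
      rw [hlast, List.append_assoc]
      have ih' := ih (by simp)
      simp only [List.cons_append, List.tail_cons] at ih'
      rw [ih']

-- the tail branch of A equals the unconditional tail range
theorem tail_if_eq (a M m : Int) (res : List Int) :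
    (if a < M - m then res ++ PySem.List.pyRange (a + m) M 1 else res)
      = res ++ PySem.List.pyRange (a + m) M 1 := by
  split_ifs with h
  · rfl
  · rw [PySem.List.pyRange_one_eq_nil (by omega), List.append_nil]

-- ===== VERDICT (by name: the statement is the Claim_ definition above) =====
theorem get_perturb_indices_spec : Claim_equal_get_perturb_indices := by
  intro l M m _
  unfold Spec_get_perturb_indices get_perturb_indices
  by_cases hnil : l = []
  · subst hnil
    simp [get_perturb_indices_alt]
  · rw [if_neg (by simpa using hnil)]
    have hfold :
        (PySem.List.pyRange 0 ((l.length : Int) - 1) 1).foldl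
          (fun result i =>
            if PySem.List.pyGetD l i 0 + m < PySem.List.pyGetD l (i + 1) 0 then
              result ++ PySem.List.pyRange (PySem.List.pyGetD l i 0 + m) (PySem.List.pyGetD l (i + 1) 0) 1
            else result) []
        = (PySem.List.pyRange 0 ((l.length : Int) - 1) 1).flatMap
            (fun i => PySem.List.pyRange (PySem.List.pyGetD l i 0 + m) (PySem.List.pyGetD l (i + 1) 0) 1) := by
      have : (fun (result : List Int) (i : Int) =>
            if PySem.List.pyGetD l i 0 + m < PySem.List.pyGetD l (i + 1) 0 then
              result ++ PySem.List.pyRange (PySem.List.pyGetD l i 0 + m) (PySem.List.pyGetD l (i + 1) 0) 1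
            else result)
          = (fun result i =>
            result ++ PySem.List.pyRange (PySem.List.pyGetD l i 0 + m) (PySem.List.pyGetD l (i + 1) 0) 1) := by
        funext res i
        rw [← gap_if_eq (PySem.List.pyGetD l i 0) (PySem.List.pyGetD l (i + 1) 0) m]
        split_ifs <;> simp
      rw [this, PySem.List.foldl_append_eq_flatMap, List.nil_append]
    simp only [hfold]
    rw [PySem.List.pyGetD_neg_one l 0 hnil, tail_if_eq, core m M l hnil, alt_eq_flatMap]
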